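-- pv_equiv track=rewrite | github.com/gereleth/aoc_python | src/year2025/day06.py | part1
-- ===== SOURCE A (Python) =====
-- def part1(text_input: str) -> int:
--     lines = [line.split() for line in text_input.split("\n")]
--     problems = [[line[i] for line in lines] for i in range(len(lines[0]))]
--     total = 0
--     for problem in problems:
--         sign = problem.pop()
--         if sign == "+":
--             total += sum(int(p) for p in problem)
--         elif sign == "*":
--             product = 1
--             for p in problem:
--                 product *= int(p)
--             total += product
--     return total
-- ===== SOURCE B (Python) =====
-- def part1(text_input: str) -> int:
--     # Row-major streaming pass keeping one accumulator per column,
--     # instead of materializing the transpose and folding column by column.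
--     rows = [line.split() for line in text_input.split("\n")]
--     signs = rows[-1]
--     n = len(rows[0])
--     acc = [0 if signs[i] == "+" else 1 for i in range(n)]
--     for row in rows[:-1]:
--         acc = [acc[i] + int(row[i]) if signs[i] == "+"
--                else acc[i] * int(row[i]) if signs[i] == "*"
--                else acc[i]
--                for i in range(n)]
--     return sum(acc[i] for i in range(n) if signs[i] in ("+", "*"))
-- ===== Notes on version B (the rewrite author's own statement) =====
-- stated objective: alternative
-- what changed: B replaces A's build-the-transpose-then-fold-each-column pass by a single row-major streaming pass that maintains one accumulator per column (0 for '+', 1 for '*') and sums the sign columns at the end.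
import Mathlib
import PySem

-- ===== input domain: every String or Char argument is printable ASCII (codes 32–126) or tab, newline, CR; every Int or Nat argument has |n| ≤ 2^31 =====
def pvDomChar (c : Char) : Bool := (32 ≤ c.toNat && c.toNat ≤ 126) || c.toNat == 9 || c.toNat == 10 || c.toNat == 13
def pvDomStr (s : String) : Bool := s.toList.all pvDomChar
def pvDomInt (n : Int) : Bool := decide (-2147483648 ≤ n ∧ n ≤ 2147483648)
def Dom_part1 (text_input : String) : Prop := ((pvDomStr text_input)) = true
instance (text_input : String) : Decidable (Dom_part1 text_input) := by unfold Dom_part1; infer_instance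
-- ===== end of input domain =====

-- B re-implements part1 by a row-major streaming pass over the number rows, keeping one
-- accumulator per column, instead of materializing the transpose and folding per column
-- (objective: alternative decomposition, same asymptotic cost).

-- shared first line of both Pythons: [line.split() for line in text_input.split("\n")]
-- (split? is some for the non-empty separator "\n"; getD [] is never taken)
def pvRows (text_input : String) : List (List String) :=
  ((PySem.Str.split? text_input "\n").getD []).map PySem.Str.split₀

-- ===== PORT A =====
def part1 (text_input : String) : Int :=
  let lines := pvRows text_input
  -- problems = [[line[i] for line in lines] for i in range(len(lines[0]))]
  let problems := (PySem.List.pyRange 0 ((PySem.List.pyGetD lines 0 []).length : Int) 1).map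
    (fun i => lines.map (fun line => PySem.List.pyGetD line i ""))
  problems.foldl (fun total problem =>
    -- sign = problem.pop()  (problem is never empty in Python; the none branch is unreachable)
    match PySem.List.pop? problem (-1) with
    | none => total
    | some (sign, rest) =>
      if sign = "+" then
        total + rest.foldl (fun s p => s + (PySem.Int.ofStr? p).getD 0) 0
      else if sign = "*" then
        total + rest.foldl (fun pr p => pr * (PySem.Int.ofStr? p).getD 0) 1
      else total) 0

-- ===== PORT B =====
def part1_alt (text_input : String) : Int :=
  let rows := pvRows text_input
  let signs := PySem.List.pyGetD rows (-1) []          -- rows[-1]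
  let n := (PySem.List.pyGetD rows 0 []).length        -- len(rows[0])
  let acc0 := (PySem.List.pyRange 0 (n : Int) 1).map
    (fun i => if PySem.List.pyGetD signs i "" = "+" then (0 : Int) else 1)
  -- for row in rows[:-1]  (rows[:-1] on a list is exactly List.dropLast)
  let acc := rows.dropLast.foldl (fun acc row =>
    (PySem.List.pyRange 0 (n : Int) 1).map (fun i =>
      if PySem.List.pyGetD signs i "" = "+" then
        PySem.List.pyGetD acc i 0 + (PySem.Int.ofStr? (PySem.List.pyGetD row i "")).getD 0
      else if PySem.List.pyGetD signs i "" = "*" then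
        PySem.List.pyGetD acc i 0 * (PySem.Int.ofStr? (PySem.List.pyGetD row i "")).getD 0
      else PySem.List.pyGetD acc i 0)) acc0
  (PySem.List.pyRange 0 (n : Int) 1).foldl (fun t i =>
    if PySem.List.pyGetD signs i "" = "+" ∨ PySem.List.pyGetD signs i "" = "*"
    then t + PySem.List.pyGetD acc i 0 else t) 0

-- ===== PRECONDITION & SPEC =====
-- Pre_ excludes exactly the inputs where Python A raises: a whitespace-split line shorter than
-- the first line (IndexError while building the transpose), or a cell of a '+'/'*' column,
-- other than the sign itself, that int() rejects (ValueError).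
def Pre_part1 (text_input : String) : Prop :=
  (∀ row ∈ pvRows text_input,
      (PySem.List.pyGetD (pvRows text_input) 0 []).length ≤ row.length) ∧
  (∀ i : Nat, i < (PySem.List.pyGetD (pvRows text_input) 0 []).length →
    ((PySem.List.pyGetD (pvRows text_input) (-1) []).getD i "" = "+" ∨
     (PySem.List.pyGetD (pvRows text_input) (-1) []).getD i "" = "*") →
    ∀ row ∈ (pvRows text_input).dropLast, PySem.Int.ofStr? (row.getD i "") ≠ none)
instance (text_input : String) : Decidable (Pre_part1 text_input) := by
  unfold Pre_part1; infer_instance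

def pvWitness_part1 : String := "1 2\n3 4\n+ *"

def Spec_part1 (text_input : String) (out : Int) : Prop := out = part1_alt text_input
instance (text_input : String) (out : Int) : Decidable (Spec_part1 text_input out) := by
  unfold Spec_part1; infer_instance

-- ===== CLAIM (what is proved, stated in full; the proofs are below) =====
def Claim_equal_part1 : Prop := ∀ (text_input : String), Dom_part1 text_input →
  Pre_part1 text_input → Spec_part1 text_input (part1 text_input)

-- ===== LEMMAS AND PROOFS =====

-- the value column i contributes to the total (0 for an unknown sign)
def fcol (rows : List (List String)) (i : Int) : Int :=
  if (PySem.List.pyGetD (PySem.List.pyGetD rows (-1) []) i "") = "+" then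
    (rows.dropLast.map (fun row => PySem.List.pyGetD row i "")).foldl
      (fun s p => s + (PySem.Int.ofStr? p).getD 0) 0
  else if (PySem.List.pyGetD (PySem.List.pyGetD rows (-1) []) i "") = "*" then
    (rows.dropLast.map (fun row => PySem.List.pyGetD row i "")).foldl
      (fun pr p => pr * (PySem.Int.ofStr? p).getD 0) 1
  else 0

-- A's column-major fold computes Σ fcol
theorem A_cols (rows : List (List String)) (nI : Int) :
    ((PySem.List.pyRange 0 nI 1).map (fun i => rows.map (fun line => PySem.List.pyGetD line i ""))).foldl
      (fun total problem =>
        match PySem.List.pop? problem (-1) with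
        | none => total
        | some (sign, rest) =>
          if sign = "+" then
            total + rest.foldl (fun s p => s + (PySem.Int.ofStr? p).getD 0) 0
          else if sign = "*" then
            total + rest.foldl (fun pr p => pr * (PySem.Int.ofStr? p).getD 0) 1
          else total) 0
    = (PySem.List.pyRange 0 nI 1).foldl (fun t i => t + fcol rows i) 0 := by
  rw [List.foldl_map]
  apply PySem.List.foldl_congr_mem
  intro t i _
  rcases List.eq_nil_or_concat rows with rfl | ⟨rs, lastrow, rfl⟩
  · simp [fcol, PySem.List.pop?, PySem.List.pyGetD, PySem.List.pyGet?, PySem.List.pyIdx?]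
  · rw [List.concat_eq_append, List.map_append, List.map_singleton]
    rw [PySem.List.pop?_last]
    simp only [fcol, PySem.List.pyGetD_neg_one_append_singleton, List.dropLast_concat]
    split_ifs <;> simp

-- element i of B's row-major fold is the plain per-column fold
theorem fold_pointwise (u : Int → Int → List String → Int) (nI i : Int)
    (h0 : 0 ≤ i) (hi : i < nI) (rows : List (List String)) :
    ∀ (acc0 : List Int),
      PySem.List.pyGetD
        (rows.foldl (fun acc row =>
          (PySem.List.pyRange 0 nI 1).map (fun j => u j (PySem.List.pyGetD acc j 0) row)) acc0) i 0
      = rows.foldl (fun x row => u i x row) (PySem.List.pyGetD acc0 i 0) := by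
  induction rows with
  | nil => intro acc0; rfl
  | cons r rest ih =>
    intro acc0
    simp only [List.foldl_cons]
    rw [ih, PySem.List.pyGetD_map_pyRange_of_nonneg _ nI i 0 h0 hi]

theorem ports_eq (text_input : String) : part1 text_input = part1_alt text_input := by
  unfold part1 part1_alt
  rw [A_cols (pvRows text_input) ((PySem.List.pyGetD (pvRows text_input) 0 []).length : Int)]
  apply Eq.symm
  apply PySem.List.foldl_congr_mem
  intro t i hi
  obtain ⟨h0, hn⟩ := PySem.List.mem_pyRange_one.mp hi
  rw [fold_pointwise
      (fun j x row =>
        if PySem.List.pyGetD (PySem.List.pyGetD (pvRows text_input) (-1) []) j "" = "+" then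
          x + (PySem.Int.ofStr? (PySem.List.pyGetD row j "")).getD 0
        else if PySem.List.pyGetD (PySem.List.pyGetD (pvRows text_input) (-1) []) j "" = "*" then
          x * (PySem.Int.ofStr? (PySem.List.pyGetD row j "")).getD 0
        else x)
      _ i h0 hn]
  rw [PySem.List.pyGetD_map_pyRange_of_nonneg _ _ i 0 h0 hn]
  by_cases hplus : PySem.List.pyGetD (PySem.List.pyGetD (pvRows text_input) (-1) []) i "" = "+"
  · simp [fcol, hplus, ← List.map_dropLast, List.foldl_map]
  · by_cases hstar : PySem.List.pyGetD (PySem.List.pyGetD (pvRows text_input) (-1) []) i "" = "*"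
    · simp [fcol, hplus, hstar, ← List.map_dropLast, List.foldl_map]
    · simp [fcol, hplus, hstar]

-- ===== VERDICT (by name: the statement is the Claim_ definition above) =====
theorem part1_spec : Claim_equal_part1 := by
  intro text_input _ _
  unfold Spec_part1
  exact ports_eq text_input
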